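-- pv_equiv track=rewrite | github.com/qnano/CLEAR-IT | clearit/shap/metrics.py | infer_pairs_by_name
-- ===== SOURCE A (Python) =====
-- from typing import Dict, List, Tuple, Optional, Sequence
--
-- def _norm(s: str) -> str:
--     return "".join(ch for ch in str(s) if ch.isalnum()).lower()
--
-- def infer_pairs_by_name(channel_strings: List[str], class_strings: List[str]) -> List[Tuple[int,int]]:
--     """
--     Pair class 'X+' with channel 'X' when alphanumeric names match (case-insensitive).
--     Special case: CK+ pairs to Pan-Keratin if literal 'CK' channel not present.
--     """
--     chan_map = {_norm(ch): i for i, ch in enumerate(channel_strings or [])}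
--
--     # Pan-Keratin aliases
--     pan_keys = {"pankeratin", "pancytokeratin", "panck", "pancytokeratins"}
--     pan_idx = next((chan_map[k] for k in pan_keys if k in chan_map), None)
--
--     pairs: List[Tuple[int,int]] = []
--     for k, cls in enumerate(class_strings or []):
--         key = _norm(str(cls).replace("+", ""))  # 'CK+' -> 'ck'
--         if key in chan_map:
--             pairs.append((chan_map[key], k))
--         elif key == "ck" and pan_idx is not None:
--             pairs.append((pan_idx, k))
--     return pairs
-- ===== SOURCE B (Python) =====
-- from typing import List, Tuple
--
-- _PAN_KEYS = {"pankeratin", "pancytokeratin", "panck", "pancytokeratins"}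
--
-- def _norm(s: str) -> str:
--     return "".join(ch for ch in str(s) if ch.isalnum()).lower()
--
-- def infer_pairs_by_name(channel_strings: List[str], class_strings: List[str]) -> List[Tuple[int, int]]:
--     # channel-major: each channel stamps its index onto every class key it matches
--     keys = [_norm(str(c).replace("+", "")) for c in (class_strings or [])]
--     best = [None] * len(keys)
--     pan = None
--     for i, ch in enumerate(channel_strings or []):
--         n = _norm(ch)
--         best = [i if n == key else b for key, b in zip(keys, best)]
--         if n in _PAN_KEYS:
--             pan = i
--     pairs: List[Tuple[int, int]] = []
--     for k, (key, b) in enumerate(zip(keys, best)):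
--         if b is not None:
--             pairs.append((b, k))
--         elif key == "ck" and pan is not None:
--             pairs.append((pan, k))
--     return pairs
-- ===== Notes on version B (the rewrite author's own statement) =====
-- stated objective: alternative
-- what changed: B transposes the loops: instead of A's prebuilt channel->index dict queried per class, B does one channel-major pass in which each channel stamps its index onto every class key it matches (and onto a pan accumulator), then a final pass over the classes emits the pairs.
-- outside the precondition, e.g. on infer_pairs_by_name(['PanCK', 'Pan-Keratin'], ['CK+']): A returns [(0, 0)], B returns [(1, 0)]
import Mathlib
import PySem

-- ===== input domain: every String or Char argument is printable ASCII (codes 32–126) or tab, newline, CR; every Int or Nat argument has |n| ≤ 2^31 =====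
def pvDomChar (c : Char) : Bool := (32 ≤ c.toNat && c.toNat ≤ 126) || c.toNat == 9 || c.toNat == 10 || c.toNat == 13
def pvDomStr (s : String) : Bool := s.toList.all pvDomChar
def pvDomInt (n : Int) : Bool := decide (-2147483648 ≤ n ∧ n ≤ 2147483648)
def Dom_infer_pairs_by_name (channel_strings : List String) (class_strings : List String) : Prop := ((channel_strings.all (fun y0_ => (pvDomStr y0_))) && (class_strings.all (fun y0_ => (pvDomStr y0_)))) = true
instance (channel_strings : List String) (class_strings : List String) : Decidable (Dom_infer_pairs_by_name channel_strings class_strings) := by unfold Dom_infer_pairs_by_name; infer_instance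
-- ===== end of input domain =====

-- B transposes A's loops: a channel-major pass stamps each channel's index onto matching class
-- keys (and a pan accumulator), then a class pass emits pairs (objective: alternative; no index table).


-- ===== PORT A =====
-- _norm(s): keep alphanumeric characters, lowercase
def pvNorm (s : String) : String :=
  PySem.Str.lower (String.ofList (s.toList.filter PySem.Chars.isalnum))

-- the Pan-Keratin alias set literal (a Python set of 4 distinct strings; under Pre_ the
-- iteration order over it cannot affect the result, so we iterate in the literal's order)
def pvPanKeys : List String := ["pankeratin", "pancytokeratin", "panck", "pancytokeratins"]

def infer_pairs_by_name (channel_strings : List String) (class_strings : List String) : List (Int × Int) :=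
  -- chan_map = {_norm(ch): i for i, ch in enumerate(channel_strings or [])}
  let chan_map : PySem.Dict String Int :=
    (PySem.List.enumerate channel_strings).foldl
      (fun d p => d.insert (pvNorm p.2) p.1) PySem.Dict.empty
  -- pan_idx = next((chan_map[k] for k in pan_keys if k in chan_map), None)
  let pan_idx : Option Int :=
    pvPanKeys.foldl (fun acc k => match acc with | some v => some v | none => chan_map.get? k) none
  (PySem.List.enumerate class_strings).foldl
    (fun pairs p =>
      let key := pvNorm (PySem.Str.replace p.2 "+" "")
      match chan_map.get? key with
      | some i => pairs ++ [(i, p.1)]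
      | none =>
        if key = "ck" then
          match pan_idx with
          | some i => pairs ++ [(i, p.1)]
          | none => pairs
        else pairs) []

-- ===== PORT B =====
def infer_pairs_by_name_alt (channel_strings : List String) (class_strings : List String) : List (Int × Int) :=
  -- keys = [_norm(str(c).replace('+','')) for c in (class_strings or [])]
  let keys := class_strings.map (fun c => pvNorm (PySem.Str.replace c "+" ""))
  -- channel-major pass over (best, pan): best starts as [None]*len(keys), pan as None
  let st := (PySem.List.enumerate channel_strings).foldl
    (fun (st : List (Option Int) × Option Int) p =>
      let n := pvNorm p.2
      (List.zipWith (fun key b => if n == key then some p.1 else b) keys st.1,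
       if decide (n ∈ pvPanKeys) then some p.1 else st.2))
    (keys.map (fun _ => (none : Option Int)), none)
  -- for k, (key, b) in enumerate(zip(keys, best)): …
  (PySem.List.enumerate (keys.zip st.1)).foldl
    (fun pairs q =>
      match q.2.2 with
      | some i => pairs ++ [(i, q.1)]
      | none =>
        if q.2.1 = "ck" then
          match st.2 with
          | some i => pairs ++ [(i, q.1)]
          | none => pairs
        else pairs) []

-- ===== PRECONDITION & SPEC =====
-- Pre_ excludes the inputs where channel_strings contains two DIFFERENTLY-normalized Pan-Keratin
-- aliases while some class normalizes to 'ck' and no channel does: only there A's chosen pan index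
-- depends on Python's hash-randomized set iteration order over pan_keys, an accidental corner no
-- caller would specify (A is nondeterministic across PYTHONHASHSEED values on those inputs).
def Pre_infer_pairs_by_name (channel_strings : List String) (class_strings : List String) : Prop :=
  (∀ x ∈ (channel_strings.map pvNorm).filter (fun n => decide (n ∈ pvPanKeys)),
   ∀ y ∈ (channel_strings.map pvNorm).filter (fun n => decide (n ∈ pvPanKeys)), x = y)
  ∨ "ck" ∉ class_strings.map (fun c => pvNorm (PySem.Str.replace c "+" ""))
  ∨ "ck" ∈ channel_strings.map pvNorm

instance (channel_strings : List String) (class_strings : List String) : Decidable (Pre_infer_pairs_by_name channel_strings class_strings) := by unfold Pre_infer_pairs_by_name; infer_instance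

def pvWitness_infer_pairs_by_name : List String × List String :=
  (["DAPI", "Pan-Keratin", "CD45"], ["CD45+", "CK+", "Other"])

def Spec_infer_pairs_by_name (channel_strings : List String) (class_strings : List String) (out : List (Int × Int)) : Prop := out = infer_pairs_by_name_alt channel_strings class_strings
instance (channel_strings : List String) (class_strings : List String) (out : List (Int × Int)) : Decidable (Spec_infer_pairs_by_name channel_strings class_strings out) := by unfold Spec_infer_pairs_by_name; infer_instance

-- ===== CLAIM (what is proved, stated in full; the proofs are below) =====
def Claim_equal_infer_pairs_by_name : Prop := ∀ (channel_strings : List String) (class_strings : List String), Dom_infer_pairs_by_name channel_strings class_strings → Pre_infer_pairs_by_name channel_strings class_strings → Spec_infer_pairs_by_name channel_strings class_strings (infer_pairs_by_name channel_strings class_strings)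

-- ===== LEMMAS AND PROOFS =====

-- proof-level helper: the index of the LAST element of `normed` satisfying `pred` — both A's
-- dict lookups and B's channel-major accumulators are shown equal to it
def pvLastIndex (normed : List String) (pred : String → Bool) : Option Int :=
  (PySem.List.enumerate normed).foldl
    (fun idx q => if pred q.2 then some q.1 else idx) none

-- enumerating a mapped list is mapping over the enumeration
theorem pv_enumerate_map {α β : Type} (f : α → β) (xs : List α) (st : Int) :
    PySem.List.enumerate (xs.map f) st
      = (PySem.List.enumerate xs st).map (fun p => (p.1, f p.2)) := by
  induction xs generalizing st with
  | nil => rfl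
  | cons x t ih => simp [PySem.List.enumerate_cons, ih]

-- a scan of the pre-normalized list is the scan that normalizes on the fly
theorem pv_lastIndex_map (channel_strings : List String) (pred : String → Bool) :
    pvLastIndex (channel_strings.map pvNorm) pred
      = (PySem.List.enumerate channel_strings).foldl
          (fun idx q => if pred (pvNorm q.2) then some q.1 else idx) none := by
  unfold pvLastIndex
  rw [pv_enumerate_map, List.foldl_map]

-- A's chan_map lookup is exactly a last-match fold over the enumerated channels.
theorem pv_get_foldl_insert (l : List (Int × String)) (d : PySem.Dict String Int) (k : String) :
    (l.foldl (fun d p => d.insert (pvNorm p.2) p.1) d).get? k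
      = l.foldl (fun acc p => if pvNorm p.2 = k then some p.1 else acc) (d.get? k) := by
  induction l generalizing d with
  | nil => rfl
  | cons p t ih =>
    rw [List.foldl_cons, List.foldl_cons, ih, PySem.Dict.get?_insert]
    by_cases h : pvNorm p.2 = k
    · rw [if_pos h.symm, if_pos h]
    · rw [if_neg (fun hh => h hh.symm), if_neg h]

theorem pv_chanmap_eq_lastIndex (channel_strings : List String) (k : String) :
    ((PySem.List.enumerate channel_strings).foldl
        (fun d p => d.insert (pvNorm p.2) p.1) PySem.Dict.empty).get? k
      = pvLastIndex (channel_strings.map pvNorm) (fun n => n == k) := by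
  rw [pv_get_foldl_insert, pv_lastIndex_map]
  apply PySem.List.foldl_congr_mem
  intro acc q _
  by_cases h : pvNorm q.2 = k <;> simp [h]

-- B's channel-major best list is, entrywise, the last-match scan for that key
theorem pv_best_eq (l : List (Int × String)) (keys : List String) (g : String → Option Int) :
    l.foldl (fun b p => List.zipWith (fun key bb => if pvNorm p.2 == key then some p.1 else bb) keys b) (keys.map g)
      = keys.map (fun key => l.foldl (fun acc p => if pvNorm p.2 == key then some p.1 else acc) (g key)) := by
  induction l generalizing g with
  | nil => simp
  | cons p t ih =>
    simp only [List.foldl_cons]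
    rw [List.zipWith_map_right, List.zipWith_self]
    exact ih (fun key => if pvNorm p.2 == key then some p.1 else g key)

-- zipping a list with its own image pairs each element with its image
theorem pv_zip_map_self (keys : List String) (L : String → Option Int) :
    keys.zip (keys.map L) = keys.map (fun k => (k, L k)) := by
  induction keys with
  | nil => rfl
  | cons k t ih => simp [ih]

-- a last-match scan misses iff it misses on every channel
theorem pv_lastIndex_eq_none_of (channel_strings : List String) (pred : String → Bool)
    (h : ∀ c ∈ channel_strings, pred (pvNorm c) = false) :
    pvLastIndex (channel_strings.map pvNorm) pred = none := by
  rw [pv_lastIndex_map]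
  rw [PySem.List.foldl_congr_mem _ _ (fun idx _ => idx) none ?_]
  · exact List.foldl_fixed' (fun _ => rfl) _
  · intro acc q hq
    rw [PySem.List.mem_enumerate_iff] at hq
    obtain ⟨j, hj, rfl⟩ := hq
    simp [h _ (List.getElem_mem hj)]

theorem pv_foldl_hit_ne_none (l : List (Int × String)) (pred : String → Bool) :
    ∀ init : Option Int, ((∃ q ∈ l, pred (pvNorm q.2) = true) ∨ init ≠ none) →
    l.foldl (fun idx q => if pred (pvNorm q.2) then some q.1 else idx) init ≠ none := by
  induction l with
  | nil =>
    intro init h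
    rcases h with ⟨_, hmem, _⟩ | h
    · simp at hmem
    · exact h
  | cons q t ih =>
    intro init h
    simp only [List.foldl_cons]
    by_cases hq : pred (pvNorm q.2) = true
    · rw [if_pos hq]; exact ih _ (Or.inr (by simp))
    · rw [if_neg hq]
      apply ih
      rcases h with ⟨r, hr, hrp⟩ | hinit
      · rcases List.mem_cons.mp hr with rfl | hrt
        · exact absurd hrp hq
        · exact Or.inl ⟨r, hrt, hrp⟩
      · exact Or.inr hinit

theorem pv_lastIndex_ne_none_of (channel_strings : List String) (pred : String → Bool)
    (c : String) (hc : c ∈ channel_strings) (hp : pred (pvNorm c) = true) :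
    pvLastIndex (channel_strings.map pvNorm) pred ≠ none := by
  rw [pv_lastIndex_map]
  apply pv_foldl_hit_ne_none
  left
  obtain ⟨j, hj, rfl⟩ := List.mem_iff_getElem.mp hc
  refine ⟨((j : Int), channel_strings[j]), ?_, hp⟩
  rw [PySem.List.mem_enumerate_iff]
  exact ⟨j, hj, by simp⟩

-- a first-some fold over keys of which only `a` can answer returns the answer for `a`
theorem pv_firstSome_eq (ks : List String) (g : String → Option Int) (a : String) :
    a ∈ ks → (∀ k ∈ ks, k ≠ a → g k = none) → g a ≠ none →
    ks.foldl (fun acc k => match acc with | some v => some v | none => g k) none = g a := by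
  induction ks with
  | nil => intro h; simp at h
  | cons k t ih =>
    intro ha hn hne
    simp only [List.foldl_cons]
    by_cases hk : k = a
    · subst hk
      rcases hg : g k with _ | v
      · exact absurd hg hne
      · exact List.foldl_fixed' (fun _ => rfl) _
    · have hgk : g k = none := hn k (List.mem_cons_self) hk
      show List.foldl _ (g k) t = g a
      rw [hgk]
      refine ih ?_ (fun k' hk' h' => hn k' (List.mem_cons_of_mem _ hk') h') hne
      rcases List.mem_cons.mp ha with rfl | h
      · exact absurd rfl hk
      · exact h

theorem pv_firstSome_none (ks : List String) (g : String → Option Int)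
    (h : ∀ k ∈ ks, g k = none) :
    ks.foldl (fun acc k => match acc with | some v => some v | none => g k) none = none := by
  induction ks with
  | nil => rfl
  | cons k t ih =>
    simp only [List.foldl_cons]
    show List.foldl _ (g k) t = none
    rw [h k (List.mem_cons_self)]
    exact ih (fun k' hk' => h k' (List.mem_cons_of_mem _ hk'))

-- Under the unique-pan-alias hypothesis, A's pan_idx equals B's last pan-alias accumulator
-- (stated with A's chan_map lookups already rewritten to last-match scans).
theorem pv_pan_eq (channel_strings : List String)
    (hU : ∀ x ∈ (channel_strings.map pvNorm).filter (fun n => decide (n ∈ pvPanKeys)),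
          ∀ y ∈ (channel_strings.map pvNorm).filter (fun n => decide (n ∈ pvPanKeys)), x = y) :
    pvPanKeys.foldl
      (fun acc k => match acc with
        | some v => some v
        | none => pvLastIndex (channel_strings.map pvNorm) (fun n => n == k)) none
      = pvLastIndex (channel_strings.map pvNorm) (fun n => decide (n ∈ pvPanKeys)) := by
  by_cases hE : ∃ c ∈ channel_strings, pvNorm c ∈ pvPanKeys
  · obtain ⟨c, hc, hcp⟩ := hE
    set a := pvNorm c with ha
    have haP : a ∈ (channel_strings.map pvNorm).filter (fun n => decide (n ∈ pvPanKeys)) := by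
      rw [List.mem_filter]
      exact ⟨List.mem_map_of_mem hc, by simpa using hcp⟩
    have hall : ∀ d ∈ channel_strings, pvNorm d ∈ pvPanKeys → pvNorm d = a := by
      intro d hd hdp
      exact hU _ (by rw [List.mem_filter]; exact ⟨List.mem_map_of_mem hd, by simpa using hdp⟩) _ haP
    have hB : pvLastIndex (channel_strings.map pvNorm) (fun n => decide (n ∈ pvPanKeys))
        = pvLastIndex (channel_strings.map pvNorm) (fun n => n == a) := by
      rw [pv_lastIndex_map, pv_lastIndex_map]
      apply PySem.List.foldl_congr_mem
      intro acc q hq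
      rw [PySem.List.mem_enumerate_iff] at hq
      obtain ⟨j, hj, rfl⟩ := hq
      by_cases h : pvNorm channel_strings[j] ∈ pvPanKeys
      · have := hall _ (List.getElem_mem hj) h
        simp [this, hcp]
      · have hne : pvNorm channel_strings[j] ≠ a := fun hh => h (by rw [hh]; exact hcp)
        simp [h, hne]
    have hnone : ∀ k ∈ pvPanKeys, k ≠ a →
        pvLastIndex (channel_strings.map pvNorm) (fun n => n == k) = none := by
      intro k hk hka
      apply pv_lastIndex_eq_none_of
      intro d hd
      by_cases h : pvNorm d ∈ pvPanKeys
      · have := hall d hd h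
        have hak : ¬ a = k := fun hh => hka hh.symm
        simp [this, hak]
      · have : pvNorm d ≠ k := fun hh => h (hh ▸ hk)
        simp [this]
    have hne : pvLastIndex (channel_strings.map pvNorm) (fun n => n == a) ≠ none :=
      pv_lastIndex_ne_none_of _ _ c hc (by simp [ha])
    rw [hB, pv_firstSome_eq pvPanKeys _ a hcp hnone hne]
  · have hE' : ∀ d ∈ channel_strings, pvNorm d ∉ pvPanKeys :=
      fun d hd hdp => hE ⟨d, hd, hdp⟩
    rw [pv_firstSome_none, pv_lastIndex_eq_none_of]
    · intro d hd
      simpa using hE' d hd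
    · intro k hk
      apply pv_lastIndex_eq_none_of
      intro d hd
      have : pvNorm d ≠ k := fun hh => hE' d hd (hh ▸ hk)
      simp [this]

-- B's channel-major state, componentwise: best entries and pan are last-match scans
theorem pv_state_eq (channel_strings : List String) (keys : List String) :
    (PySem.List.enumerate channel_strings).foldl
      (fun (st : List (Option Int) × Option Int) p =>
        (List.zipWith (fun key b => if pvNorm p.2 == key then some p.1 else b) keys st.1,
         if decide (pvNorm p.2 ∈ pvPanKeys) then some p.1 else st.2))
      (keys.map (fun _ => (none : Option Int)), none)
    = (keys.map (fun key => pvLastIndex (channel_strings.map pvNorm) (fun n => n == key)),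
       pvLastIndex (channel_strings.map pvNorm) (fun n => decide (n ∈ pvPanKeys))) := by
  refine (List.foldl_hom₂ (PySem.List.enumerate channel_strings) Prod.mk
      (fun b p => List.zipWith (fun key bb => if pvNorm p.2 == key then some p.1 else bb) keys b)
      (fun a p => if decide (pvNorm p.2 ∈ pvPanKeys) then some p.1 else a)
      _ (keys.map (fun _ => (none : Option Int))) none (fun _ _ => congrFun rfl)).trans ?_
  rw [pv_best_eq, pv_lastIndex_map]
  refine congrArg₂ Prod.mk (List.map_congr_left ?_) rfl
  intro key _
  rw [pv_lastIndex_map]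

-- ===== VERDICT (by name: the statement is the Claim_ definition above) =====
theorem infer_pairs_by_name_spec : Claim_equal_infer_pairs_by_name := by
  intro channel_strings class_strings _ hpre
  unfold Spec_infer_pairs_by_name infer_pairs_by_name infer_pairs_by_name_alt
  simp only [pv_state_eq]
  rw [pv_zip_map_self, List.map_map, pv_enumerate_map, List.foldl_map]
  apply PySem.List.foldl_congr_mem
  intro pairs p hp
  simp only [pv_chanmap_eq_lastIndex, Function.comp]
  rcases hidx : pvLastIndex (channel_strings.map pvNorm)
      (fun n => n == pvNorm (PySem.Str.replace p.2 "+" "")) with _ | i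
  · by_cases hck : pvNorm (PySem.Str.replace p.2 "+" "") = "ck"
    · have hpan : List.foldl
          (fun acc k => match acc with
            | some v => some v
            | none => pvLastIndex (channel_strings.map pvNorm) (fun n => n == k)) none pvPanKeys
          = pvLastIndex (channel_strings.map pvNorm) (fun n => decide (n ∈ pvPanKeys)) := by
        rcases hpre with hU | hno | hyes
        · exact pv_pan_eq channel_strings hU
        · exfalso
          rw [PySem.List.mem_enumerate_iff] at hp
          obtain ⟨j, hj, rfl⟩ := hp
          exact hno (by rw [← hck]; exact List.mem_map_of_mem (List.getElem_mem hj))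
        · exfalso
          obtain ⟨c, hc, hcn⟩ := List.mem_map.mp hyes
          exact pv_lastIndex_ne_none_of channel_strings _ c hc
            (by rw [hcn, hck]; simp) hidx
      simp only [if_pos hck, hpan]
    · simp only [if_neg hck]
  · rfl
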